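-- pv_equiv track=rewrite | github.com/EssiasSouza/autoListAndSendFiles | main-autoListAndSend.py | find_matching_paths
-- ===== SOURCE A (Python) =====
-- def find_matching_paths(broom_dir, search_patterns):
--     results_found = []
--     results_not_found = []
--     for pattern in search_patterns:
--         found = False
--         for path in broom_dir:
--             if str(pattern) in path:
--                 results_found.append(path)
--                 found = True
--                 break
--         if not found:
--             results_not_found.append(f"not found {pattern}")
--     return results_found, results_not_found
-- ===== SOURCE B (Python) =====
-- def find_matching_paths(broom_dir, search_patterns):
--     patterns = [str(p) for p in search_patterns]
--     first = {}                       # pattern -> first path containing it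
--     remaining = list(dict.fromkeys(patterns))
--     for path in broom_dir:
--         if not remaining:
--             break
--         for p in remaining:
--             if p in path:
--                 first[p] = path
--         remaining = [p for p in remaining if p not in first]
--     found = [first[p] for p in patterns if p in first]
--     not_found = [f"not found {p}" for p in patterns if p not in first]
--     return found, not_found
-- ===== Notes on version B (the rewrite author's own statement) =====
-- stated objective: alternative
-- what changed: Loops are transposed: instead of rescanning the path list for every pattern, B makes one pass over the paths keeping a worklist of still-unmatched deduplicated patterns and a dict of each pattern's first matching path, then emits results in pattern order; it trades A's per-pattern rescans for worklist bookkeeping.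
import Mathlib
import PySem

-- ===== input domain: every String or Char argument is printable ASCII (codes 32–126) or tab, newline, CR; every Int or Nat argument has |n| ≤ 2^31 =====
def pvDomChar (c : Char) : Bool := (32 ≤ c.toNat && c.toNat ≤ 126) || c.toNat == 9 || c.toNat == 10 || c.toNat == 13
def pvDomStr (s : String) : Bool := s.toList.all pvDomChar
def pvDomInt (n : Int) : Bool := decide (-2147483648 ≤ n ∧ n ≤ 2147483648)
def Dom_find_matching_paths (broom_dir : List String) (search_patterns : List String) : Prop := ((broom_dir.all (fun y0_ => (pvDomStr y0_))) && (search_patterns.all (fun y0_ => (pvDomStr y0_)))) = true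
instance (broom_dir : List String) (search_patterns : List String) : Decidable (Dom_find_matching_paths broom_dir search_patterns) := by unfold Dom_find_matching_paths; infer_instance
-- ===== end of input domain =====

-- B transposes the loops: a single pass over the paths with a worklist of still-unmatched
-- deduplicated patterns and a dict of first matches, emitted in pattern order at the end (alternative decomposition, same cost).

-- ===== PORT A =====
-- f"not found {pattern}" (str(pattern) is the identity on strings)
def notFoundMsg (pattern : String) : String := "not found " ++ pattern

-- inner 'for path in broom_dir: … break' loop with its 'found' flag: first path containing pattern
def aFind (pattern : String) : List String → Option String
  | [] => none
  | path :: rest => if PySem.Str.isIn pattern path then some path else aFind pattern rest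

def find_matching_paths (broom_dir : List String) (search_patterns : List String) : List String × List String :=
  search_patterns.foldl (fun acc pattern =>
    match aFind pattern broom_dir with
    | some path => (acc.1 ++ [path], acc.2)
    | none => (acc.1, acc.2 ++ [notFoundMsg pattern])) ([], [])

-- ===== PORT B =====
-- f"not found {p}" for B
def bNotFound (p : String) : String := "not found " ++ p

-- 'for path in broom_dir' loop: first = dict of first matching path per pattern,
-- remaining = patterns not yet matched; the loop exits when remaining is empty.
def bScan : PySem.Dict String String → List String → List String → PySem.Dict String String
  | first, _, [] => first
  | first, remaining, path :: rest =>
    if remaining.isEmpty then first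
    else
      let first' := remaining.foldl (fun d p => if PySem.Str.isIn p path then d.insert p path else d) first
      bScan first' (remaining.filter (fun p => (first'.get? p).isNone)) rest

def find_matching_paths_alt (broom_dir : List String) (search_patterns : List String) : List String × List String :=
  let first := bScan PySem.Dict.empty (PySem.List.dedup search_patterns) broom_dir
  ((search_patterns.filter (fun p => (first.get? p).isSome)).map (fun p => (first.get? p).getD ""),
   (search_patterns.filter (fun p => (first.get? p).isNone)).map bNotFound)

-- ===== PRECONDITION & SPEC =====
def Spec_find_matching_paths (broom_dir : List String) (search_patterns : List String) (out : List String × List String) : Prop := out = find_matching_paths_alt broom_dir search_patterns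
instance (broom_dir : List String) (search_patterns : List String) (out : List String × List String) : Decidable (Spec_find_matching_paths broom_dir search_patterns out) := by unfold Spec_find_matching_paths; infer_instance

-- ===== CLAIM (what is proved, stated in full; the proofs are below) =====
def Claim_equal_find_matching_paths : Prop := ∀ (broom_dir : List String) (search_patterns : List String), Dom_find_matching_paths broom_dir search_patterns → Spec_find_matching_paths broom_dir search_patterns (find_matching_paths broom_dir search_patterns)

-- ===== LEMMAS AND PROOFS =====

-- lookup after the inner insert loop of one path
lemma get_foldl_ins (path : String) : ∀ (rem : List String) (d : PySem.Dict String String) (p : String),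
    (rem.foldl (fun d q => if PySem.Str.isIn q path then d.insert q path else d) d).get? p
      = if p ∈ rem ∧ PySem.Str.isIn p path = true then some path else d.get? p := by
  intro rem
  induction rem with
  | nil => intro d p; simp
  | cons q rem ih =>
    intro d p
    simp only [List.foldl_cons]
    rw [ih]
    by_cases hpq : p = q
    · subst hpq
      by_cases hin : PySem.Chars.isIn p.toList path.toList = true
      · by_cases hmem : p ∈ rem <;>
          simp [PySem.Str.isIn_eq, hin, hmem, PySem.Dict.get?_insert_self]
      · simp [PySem.Str.isIn_eq, hin]
    · by_cases hin : PySem.Chars.isIn q.toList path.toList = true <;>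
        simp [PySem.Str.isIn_eq, List.mem_cons, hpq, hin, PySem.Dict.get?_insert_of_ne]

-- characterization of the outer loop: on the worklist the dict ends up at the first match
lemma bScan_get : ∀ (paths rem : List String) (d : PySem.Dict String String),
    (∀ p ∈ rem, d.get? p = none) →
    ∀ p, (bScan d rem paths).get? p = if p ∈ rem then aFind p paths else d.get? p := by
  intro paths
  induction paths with
  | nil =>
    intro rem d hinv p
    simp only [bScan, aFind]
    by_cases hmem : p ∈ rem
    · simp [hmem, hinv p hmem]
    · simp [hmem]
  | cons path rest ih =>
    intro rem d hinv p
    cases rem with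
    | nil => simp [bScan]
    | cons r rs =>
      simp only [bScan, List.isEmpty_cons, Bool.false_eq_true, if_false]
      set rem := r :: rs with hrem
      set d' := rem.foldl (fun d q => if PySem.Str.isIn q path then d.insert q path else d) d with hd'
      have hget : ∀ q, d'.get? q = if q ∈ rem ∧ PySem.Str.isIn q path = true then some path else d.get? q :=
        fun q => get_foldl_ins path rem d q
      have hinv' : ∀ q ∈ rem.filter (fun p => (d'.get? p).isNone), d'.get? q = none := by
        intro q hq
        have := List.of_mem_filter hq
        simpa [Option.isNone_iff_eq_none] using this
      rw [ih _ _ hinv']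
      by_cases hmem : p ∈ rem
      · by_cases hin : PySem.Chars.isIn p.toList path.toList = true
        · have hdp : d'.get? p = some path := by rw [hget]; simp [PySem.Str.isIn_eq, hmem, hin]
          have hnot : p ∉ rem.filter (fun p => (d'.get? p).isNone) := by
            simp [List.mem_filter, hdp]
          simp [PySem.Str.isIn_eq, hnot, hmem, hdp, aFind, hin]
        · have hdp : d'.get? p = d.get? p := by rw [hget]; simp [PySem.Str.isIn_eq, hin]
          have hnone : d'.get? p = none := by rw [hdp]; exact hinv p hmem
          have hkeep : p ∈ rem.filter (fun p => (d'.get? p).isNone) := by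
            simp [List.mem_filter, hmem, hnone]
          simp [PySem.Str.isIn_eq, hkeep, hmem, aFind, hin]
      · have hnot : p ∉ rem.filter (fun p => (d'.get? p).isNone) := fun h => hmem (List.mem_of_mem_filter h)
        have hdp : d'.get? p = d.get? p := by rw [hget]; simp [hmem]
        simp [hnot, hmem, hdp]

-- A's foldl in closed filter/map form
lemma a_foldl_char (bd : List String) : ∀ (pats : List String) (acc : List String × List String),
    pats.foldl (fun acc pattern =>
      match aFind pattern bd with
      | some path => (acc.1 ++ [path], acc.2)
      | none => (acc.1, acc.2 ++ [notFoundMsg pattern])) acc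
    = (acc.1 ++ (pats.filter (fun p => (aFind p bd).isSome)).map (fun p => (aFind p bd).getD ""),
       acc.2 ++ (pats.filter (fun p => (aFind p bd).isNone)).map notFoundMsg) := by
  intro pats
  induction pats with
  | nil => intro acc; simp
  | cons p pats ih =>
    intro acc
    simp only [List.foldl_cons]
    rw [ih]
    cases h : aFind p bd <;> simp [h]

-- ===== VERDICT (by name: the statement is the Claim_ definition above) =====
theorem find_matching_paths_spec : Claim_equal_find_matching_paths := by
  intro bd pats _
  unfold Spec_find_matching_paths find_matching_paths find_matching_paths_alt
  set D := bScan PySem.Dict.empty (PySem.List.dedup pats) bd with hD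
  have hget : ∀ p ∈ pats, D.get? p = aFind p bd := by
    intro p hp
    rw [hD, bScan_get bd (PySem.List.dedup pats) PySem.Dict.empty (by intro q _; simp)]
    simp [hp]
  rw [a_foldl_char]
  simp only [List.nil_append, Prod.mk.injEq]
  have hfS : pats.filter (fun p => (D.get? p).isSome) = pats.filter (fun p => (aFind p bd).isSome) :=
    List.filter_congr (fun p hp => by rw [hget p hp])
  have hfN : pats.filter (fun p => (D.get? p).isNone) = pats.filter (fun p => (aFind p bd).isNone) :=
    List.filter_congr (fun p hp => by rw [hget p hp])
  constructor
  · rw [hfS]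
    exact (List.map_congr_left fun p hp => by rw [hget p (List.mem_of_mem_filter hp)]).symm
  · rw [hfN]; rfl
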